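-- pv_equiv track=rewrite | github.com/ArthurrMrv/advent-of-code | 2023/day9.py | part2
-- ===== SOURCE A (Python) =====
-- def part2(data):
--     def get_sequence(l):
--         ans = []
--         current = l[0]
--         for e in l[1:]:
--             ans.append(e-current)
--             current = e
--         return ans
--
--     ans = 0
--     for d in data:
--         it = 0
--         curr_ans = 0
--         current_d = d.copy()
--         current_d.reverse()
--         layers = []
--         while get_sequence(current_d).count(0) < (len(current_d)-1):
--             current_d = get_sequence(current_d)
--             it += 1
--             layers.append(current_d[-1])
--         layers.reverse()
--         for l in layers:
--             curr_ans += l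
--         curr_ans += d[0]
--
--         ans += curr_ans
--     return ans
-- ===== SOURCE B (Python) =====
-- def part2(data):
--     def ext(l):
--         if all(x == 0 for x in l):
--             return 0
--         diffs = [l[i + 1] - l[i] for i in range(len(l) - 1)]
--         return l[0] - ext(diffs)
--     return sum(ext(d) for d in data)
-- ===== Notes on version B (the rewrite author's own statement) =====
-- stated objective: simpler
-- what changed: Replaces A's reverse-the-row, while-loop layer collection (gathering each difference layer's last element, reversing and summing) with a direct recursive backward extrapolation ext(l) = 0 if l is all zeros else l[0] - ext(diffs(l)), summed over the rows.
import Mathlib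
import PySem

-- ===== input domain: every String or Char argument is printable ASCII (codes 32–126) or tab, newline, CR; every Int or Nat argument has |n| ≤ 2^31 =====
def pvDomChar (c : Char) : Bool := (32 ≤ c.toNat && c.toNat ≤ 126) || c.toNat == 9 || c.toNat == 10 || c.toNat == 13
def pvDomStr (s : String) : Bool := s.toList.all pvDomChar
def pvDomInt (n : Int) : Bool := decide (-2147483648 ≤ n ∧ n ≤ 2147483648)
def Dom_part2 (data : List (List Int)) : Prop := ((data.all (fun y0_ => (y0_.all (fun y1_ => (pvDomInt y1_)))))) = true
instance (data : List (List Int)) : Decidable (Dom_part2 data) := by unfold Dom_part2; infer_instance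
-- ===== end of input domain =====

-- B replaces A's reverse/collect-last-of-each-diff-layer while-loop with a direct recursive
-- backward extrapolation ext(l) = l[0] - ext(diffs l); objective: simpler.

-- ===== PORT A =====
-- A's nested helper get_sequence: forward differences built by an append loop.
-- Python raises IndexError on l = [] (l[0]); that case is excluded by Pre_part2 and
-- never reached by the loop below on nonempty input; the [] branch is unreachable there.
def getSequence (l : List Int) : List Int :=
  match l with
  | [] => []
  | c :: rest => (rest.foldl (fun (p : List Int × Int) e => (p.1 ++ [e - p.2], e)) ([], c)).1

theorem getSequence_length (l : List Int) : (getSequence l).length = l.length - 1 := by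
  have key : ∀ (rest : List Int) (acc : List Int) (c : Int),
      ((rest.foldl (fun (p : List Int × Int) e => (p.1 ++ [e - p.2], e)) (acc, c)).1).length
        = acc.length + rest.length := by
    intro rest
    induction rest with
    | nil => intro acc c; simp [List.foldl]
    | cons e t ih => intro acc c; simp [List.foldl, ih]; omega
  cases l with
  | nil => simp [getSequence]
  | cons c rest => simp [getSequence, key]

-- A's while loop: keep taking difference layers of current_d while the next layer is not
-- all zeros, appending each layer's last element (Python current_d[-1]) to layers.
def part2Loop (cur : List Int) (layers : List Int) : List Int :=
  if (getSequence cur).count 0 < cur.length - 1 then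
    part2Loop (getSequence cur)
      (layers ++ [(PySem.List.pyGet? (getSequence cur) (-1)).getD 0])
  else layers
termination_by cur.length
decreasing_by
  have h := getSequence_length cur
  have : (getSequence cur).count 0 ≤ (getSequence cur).length := List.count_le_length
  omega

-- d[0] (Python raises on empty d; excluded by Pre_part2) is ported as d.headI.
def part2 (data : List (List Int)) : Int :=
  data.foldl (fun ans d =>
    let layers := part2Loop d.reverse []
    ans + (layers.reverse.foldl (· + ·) 0 + d.headI)) 0

-- ===== PORT B =====
-- diffs = [l[i+1] - l[i] for i in range(len(l)-1)]
def diffsB (l : List Int) : List Int := List.zipWith (fun a b => b - a) l l.tail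

theorem diffsB_length (l : List Int) : (diffsB l).length = l.length - 1 := by
  cases l with
  | nil => simp [diffsB]
  | cons a t => simp [diffsB]

def extB (l : List Int) : Int :=
  if l.all (· == 0) then 0
  else l.headI - extB (diffsB l)
termination_by l.length
decreasing_by
  have h := diffsB_length l
  have hne : l ≠ [] := by rintro rfl; simp_all [List.all]
  have : 0 < l.length := List.length_pos_iff.mpr hne
  omega

def part2_alt (data : List (List Int)) : Int :=
  data.foldl (fun s d => s + extB d) 0

-- ===== PRECONDITION & SPEC =====
-- Pre_part2 excludes inputs containing an empty sub-list: Python A raises IndexError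
-- there (l[0] inside get_sequence / d[0]).
def Pre_part2 (data : List (List Int)) : Prop := ∀ d ∈ data, d ≠ []
instance (data : List (List Int)) : Decidable (Pre_part2 data) := by unfold Pre_part2; infer_instance
def pvWitness_part2 : List (List Int) := [[10, 3, 3], [1, 2, 4, 7]]

def Spec_part2 (data : List (List Int)) (out : Int) : Prop := out = part2_alt data
instance (data : List (List Int)) (out : Int) : Decidable (Spec_part2 data out) := by unfold Spec_part2; infer_instance

-- ===== CLAIM (what is proved, stated in full; the proofs are below) =====
def Claim_equal_part2 : Prop := ∀ (data : List (List Int)), Dom_part2 data → Pre_part2 data → Spec_part2 data (part2 data)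

-- ===== LEMMAS AND PROOFS =====

theorem getSequence_eq_diffsB (l : List Int) : getSequence l = diffsB l := by
  have key : ∀ (rest : List Int) (acc : List Int) (c : Int),
      (rest.foldl (fun (p : List Int × Int) e => (p.1 ++ [e - p.2], e)) (acc, c)).1
        = acc ++ List.zipWith (fun a b => b - a) (c :: rest) rest := by
    intro rest
    induction rest with
    | nil => intro acc c; simp [List.foldl]
    | cons e t ih => intro acc c; simp [List.foldl, ih]
  cases l with
  | nil => simp [getSequence, diffsB]
  | cons c rest => simp [getSequence, diffsB, key]

theorem diffsB_cons_cons (a b : Int) (t : List Int) :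
    diffsB (a :: b :: t) = (b - a) :: diffsB (b :: t) := by
  simp [diffsB]

theorem diffsB_cons (a : Int) (t : List Int) (h : t ≠ []) :
    diffsB (a :: t) = (t.headI - a) :: diffsB t := by
  cases t with
  | nil => exact absurd rfl h
  | cons b u => simp [diffsB]

theorem diffsB_append_singleton (xs : List Int) (b x : Int) :
    diffsB (xs ++ [b, x]) = diffsB (xs ++ [b]) ++ [x - b] := by
  induction xs with
  | nil => simp [diffsB]
  | cons a t ih =>
    have h1 : diffsB (a :: (t ++ [b, x])) = ((t ++ [b, x]).headI - a) :: diffsB (t ++ [b, x]) :=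
      diffsB_cons a _ (by simp)
    have h2 : diffsB (a :: (t ++ [b])) = ((t ++ [b]).headI - a) :: diffsB (t ++ [b]) :=
      diffsB_cons a _ (by simp)
    have hh : (t ++ [b, x]).headI = (t ++ [b]).headI := by cases t <;> simp
    simp only [List.cons_append, h1, h2, hh, ih]
    try simp

theorem diffsB_reverse (l : List Int) :
    diffsB l.reverse = ((diffsB l).map (fun x => -x)).reverse := by
  induction l with
  | nil => simp [diffsB]
  | cons a t ih =>
    cases t with
    | nil => simp [diffsB]
    | cons c u =>
      have h1 : (a :: c :: u).reverse = u.reverse ++ [c, a] := by simp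
      have h2 : (c :: u).reverse = u.reverse ++ [c] := by simp
      rw [h1, diffsB_append_singleton, ← h2, ih, diffsB_cons_cons]
      simp
      try ring_nf
      try simp [neg_sub]

theorem extB_all_zero (l : List Int) (h : l.all (· == 0)) : extB l = 0 := by
  rw [extB]; simp [h]

theorem all_zero_diffsB (l : List Int) (h : l.all (· == 0)) : (diffsB l).all (· == 0) := by
  induction l with
  | nil => simp [diffsB]
  | cons a t ih =>
    cases t with
    | nil => simp [diffsB]
    | cons b u =>
      rw [diffsB_cons_cons]
      simp only [List.all_cons, Bool.and_eq_true, beq_iff_eq] at h ⊢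
      refine ⟨by omega, ?_⟩
      have := ih (by simp [h.2.1, h.2.2])
      simpa using this

theorem diffsB_map_neg (l : List Int) :
    diffsB (l.map (fun x => -x)) = (diffsB l).map (fun x => -x) := by
  induction l with
  | nil => simp [diffsB]
  | cons a t ih =>
    cases t with
    | nil => simp [diffsB]
    | cons b u =>
      simp only [List.map_cons] at ih ⊢
      rw [diffsB_cons_cons, diffsB_cons_cons, List.map_cons, ih]
      congr 1
      ring

theorem extB_neg (l : List Int) : extB (l.map (fun x => -x)) = - extB l := by
  by_cases h : l.all (· == 0)
  · have h2 : (l.map (fun x => -x)).all (· == 0) := by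
      simp only [List.all_eq_true] at h ⊢
      intro x hx
      obtain ⟨y, hy, rfl⟩ := List.mem_map.mp hx
      have := h y hy; simp_all
    rw [extB_all_zero _ h, extB_all_zero _ h2]; ring
  · have h2 : ¬ (l.map (fun x => -x)).all (· == 0) := by
      simp only [List.all_eq_true] at h ⊢
      intro hc
      apply h; intro x hx
      have h3 := hc (-x) (List.mem_map.mpr ⟨x, hx, rfl⟩)
      simp only [beq_iff_eq] at h3 ⊢
      omega
    have hh : (l.map (fun x => -x)).headI = - l.headI := by
      cases l with
      | nil => simp
      | cons a t => simp
    have e1 : extB (l.map (fun x => -x))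
        = (l.map (fun x => -x)).headI - extB (diffsB (l.map (fun x => -x))) := by
      rw [extB, if_neg h2]
    have e2 : extB l = l.headI - extB (diffsB l) := by
      rw [extB, if_neg h]
    rw [e1, e2, diffsB_map_neg, hh, extB_neg (diffsB l)]
    ring
termination_by l.length
decreasing_by
  have := diffsB_length l
  have hne : l ≠ [] := by rintro rfl; simp_all
  have : 0 < l.length := List.length_pos_iff.mpr hne
  omega

theorem part2Loop_acc (cur layers : List Int) :
    part2Loop cur layers = layers ++ part2Loop cur [] := by
  unfold part2Loop
  split_ifs with h
  · rw [part2Loop_acc (getSequence cur) (layers ++ [(PySem.List.pyGet? (getSequence cur) (-1)).getD 0]),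
        part2Loop_acc (getSequence cur) ([] ++ [(PySem.List.pyGet? (getSequence cur) (-1)).getD 0])]
    simp
  · simp
termination_by cur.length
decreasing_by all_goals
  have h' := getSequence_length cur
  have : (getSequence cur).count 0 ≤ (getSequence cur).length := List.count_le_length
  omega

theorem count_lt_iff₂ (xs : List Int) :
    (xs.count 0 < xs.length) ↔ ¬ xs.all (· == 0) := by
  have hle : xs.count 0 ≤ xs.length := List.count_le_length
  have heq : xs.count 0 = xs.length ↔ ∀ b ∈ xs, 0 = b := List.count_eq_length
  constructor
  · intro h hc
    have hall : ∀ b ∈ xs, 0 = b := by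
      intro b hb
      have := (List.all_eq_true.mp hc) b hb
      simp_all
    have := heq.mpr hall
    omega
  · intro h
    rcases lt_or_eq_of_le hle with h' | h'
    · exact h'
    · exfalso; apply h
      rw [List.all_eq_true]
      intro b hb
      have := heq.mp h' b hb
      simp_all

theorem neg_all_zero_iff (l : List Int) :
    (l.map (fun x => -x)).all (· == 0) ↔ l.all (· == 0) := by
  rw [List.all_map]
  simp only [Function.comp, List.all_eq_true, beq_iff_eq, neg_eq_zero]

theorem main_lemma : ∀ (n : ℕ) (l : List Int), l.length ≤ n → l ≠ [] →
    (part2Loop l.reverse []).foldl (· + ·) 0 + l.headI = extB l := by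
  intro n
  induction n with
  | zero => intro l hl hne; cases l <;> simp_all
  | succ n ih =>
    intro l hl hne
    rw [part2Loop]
    have hseq : getSequence l.reverse = ((diffsB l).map (fun x => -x)).reverse := by
      rw [getSequence_eq_diffsB, diffsB_reverse]
    have hlen : (getSequence l.reverse).length = l.length - 1 := by
      rw [getSequence_length]; simp
    by_cases hc : (getSequence l.reverse).count 0 < l.reverse.length - 1
    · -- loop continues: next layer not all zero
      have hnz : ¬ (diffsB l).all (· == 0) := by
        have h1 : (getSequence l.reverse).count 0 < (getSequence l.reverse).length := by
          rw [hlen]; simpa using hc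
        have := (count_lt_iff₂ _).mp h1
        rw [hseq] at this
        simp only [List.all_reverse] at this
        exact fun hz => this ((neg_all_zero_iff (diffsB l)).mpr hz)
      have hdne : diffsB l ≠ [] := by rintro he; simp [he] at hnz
      rw [if_pos hc, part2Loop_acc]
      have hlast : (PySem.List.pyGet? (getSequence l.reverse) (-1)).getD 0
          = - (diffsB l).headI := by
        rw [PySem.List.pyGet?_neg_one, hseq]
        cases hdl : diffsB l with
        | nil => exact absurd hdl hdne
        | cons a t => simp
      -- rewrite the recursive call via IH applied to l' = map neg (diffsB l)
      have hrw : getSequence l.reverse = ((diffsB l).map (fun x => -x)).reverse := hseq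
      have hlen' : ((diffsB l).map (fun x => -x)).length ≤ n := by
        have := diffsB_length l
        have : (diffsB l).length = l.length - 1 := this
        have hp : 0 < l.length := List.length_pos_iff.mpr hne
        simp only [List.length_map]
        omega
      have hne' : (diffsB l).map (fun x => -x) ≠ [] := by
        simp only [ne_eq, List.map_eq_nil_iff]; exact hdne
      have hIH := ih ((diffsB l).map (fun x => -x)) hlen' hne'
      rw [part2Loop_acc, hlast, hrw]
      have hfold : (([] ++ [- (diffsB l).headI]) ++ part2Loop ((diffsB l).map (fun x => -x)).reverse []).foldl (· + ·) 0
          = - (diffsB l).headI + (part2Loop ((diffsB l).map (fun x => -x)).reverse []).foldl (· + ·) 0 := by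
        rw [← List.sum_eq_foldl, ← List.sum_eq_foldl]
        simp
      simp only [List.nil_append] at hfold ⊢
      rw [hfold]
      have hhn : ((diffsB l).map (fun x => -x)).headI = - (diffsB l).headI := by
        cases hdl : diffsB l with
        | nil => exact absurd hdl hdne
        | cons a t => simp
      rw [extB_neg, hhn] at hIH
      have hlnz : ¬ l.all (· == 0) := fun hz => hnz (all_zero_diffsB l hz)
      rw [extB, if_neg hlnz]
      omega
    · -- loop stops: next layer all zero (or too short)
      rw [if_neg hc]
      simp only [List.foldl_nil]
      have hz : (diffsB l).all (· == 0) := by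
        by_contra hnz
        apply hc
        have h1 : ¬ ((getSequence l.reverse).all (· == 0)) := by
          rw [hseq]
          simp only [List.all_reverse]
          exact fun hm => hnz ((neg_all_zero_iff (diffsB l)).mp hm)
        have := (count_lt_iff₂ _).mpr h1
        rw [hlen] at this
        simpa using this
      by_cases hall : l.all (· == 0)
      · rw [extB_all_zero l hall]
        cases l with
        | nil => simp
        | cons a t =>
          have : a = 0 := by simpa using (List.all_eq_true.mp hall) a (by simp)
          simp [this]
      · rw [extB, if_neg hall, extB_all_zero _ hz]
        ring

theorem per_row (d : List Int) (hd : d ≠ []) :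
    (part2Loop d.reverse []).reverse.foldl (· + ·) 0 + d.headI = extB d := by
  have hrev : ∀ (xs : List Int), xs.reverse.foldl (· + ·) 0 = xs.foldl (· + ·) 0 := by
    intro xs
    rw [← List.sum_eq_foldl, ← List.sum_eq_foldl, List.sum_reverse]
  rw [hrev]
  exact main_lemma d.length d le_rfl hd

-- ===== VERDICT (by name: the statement is the Claim_ definition above) =====
theorem part2_spec : Claim_equal_part2 := by
  unfold Claim_equal_part2
  intro data _ hpre
  unfold Spec_part2 part2 part2_alt
  have key : ∀ (ds : List (List Int)) (a : Int), (∀ d ∈ ds, d ≠ []) →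
      ds.foldl (fun ans d =>
        ans + ((part2Loop d.reverse []).reverse.foldl (· + ·) 0 + d.headI)) a
      = ds.foldl (fun s d => s + extB d) a := by
    intro ds
    induction ds with
    | nil => intro a _; rfl
    | cons d t iht =>
      intro a hp
      simp only [List.foldl_cons]
      rw [per_row d (hp d (by simp))]
      exact iht _ (fun x hx => hp x (by simp [hx]))
  exact key data 0 hpre
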